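-- pv_equiv track=rewrite | github.com/ArtemisMh/Backend | app.py | _next_solo_label
-- ===== SOURCE A (Python) =====
-- SOLO_ORDER = {
--     "Pre-structural": 0,
--     "Uni-structural": 1,
--     "Multi-structural": 2,
--     "Relational": 3,
--     "Extended abstract": 4,
-- }
--
-- def _next_solo_label(current_level: str, target_level: str) -> str:
--     current_idx = SOLO_ORDER.get(current_level, 0)
--     target_idx = SOLO_ORDER.get(target_level, current_idx)
--     if current_idx >= target_idx:
--         return target_level or current_level or "Relational"
--
--     for label, idx in SOLO_ORDER.items():
--         if idx == current_idx + 1: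
--             return label
--     return target_level or current_level or "Relational"
-- ===== SOURCE B (Python) =====
-- _SUCC = {
--     "Pre-structural": "Uni-structural",
--     "Uni-structural": "Multi-structural",
--     "Multi-structural": "Relational",
--     "Relational": "Extended abstract",
-- }
--
-- def _next_solo_label(current_level: str, target_level: str) -> str:
--     cur = current_level if (current_level in _SUCC or current_level == "Extended abstract") else "Pre-structural"
--     step = _SUCC.get(cur)
--     probe = step
--     while probe is not None:
--         if probe == target_level:
--             return step
--         probe = _SUCC.get(probe)
--     return target_level or current_level or "Relational"
-- ===== Notes on version B (the rewrite author's own statement) =====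
-- stated objective: alternative
-- what changed: Dropped all numeric indices: B keeps a successor map (label -> next label) and decides whether to advance by chasing successors from the (normalized) current label looking for the target, returning the first successor on success; A instead compares dict rank numbers and scans SOLO_ORDER.items() for the label with index current_idx+1.
import Mathlib
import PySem

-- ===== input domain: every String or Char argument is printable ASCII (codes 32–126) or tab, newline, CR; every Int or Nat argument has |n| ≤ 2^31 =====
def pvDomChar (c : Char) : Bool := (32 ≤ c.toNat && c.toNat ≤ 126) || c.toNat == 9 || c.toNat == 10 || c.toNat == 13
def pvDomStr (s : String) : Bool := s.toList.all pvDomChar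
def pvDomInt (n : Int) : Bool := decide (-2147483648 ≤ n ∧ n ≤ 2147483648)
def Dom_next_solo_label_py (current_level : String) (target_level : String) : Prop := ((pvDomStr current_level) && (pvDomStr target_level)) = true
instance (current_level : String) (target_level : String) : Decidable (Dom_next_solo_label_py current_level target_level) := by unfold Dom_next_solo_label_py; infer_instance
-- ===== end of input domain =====

-- B drops all numeric indices: it chases a successor map (linked-list walk) from the current
-- label to see whether the target lies strictly ahead, returning the first successor if so
-- (objective: alternative).

-- ===== PORT A =====
def SOLO_ORDER : PySem.Dict String Int := PySem.Dict.ofList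
  [("Pre-structural", 0), ("Uni-structural", 1), ("Multi-structural", 2),
   ("Relational", 3), ("Extended abstract", 4)]

-- 'for label, idx in SOLO_ORDER.items(): if idx == current_idx + 1: return label'
def soloScan : List (String × Int) → Int → Option String
  | [], _ => none
  | (label, idx) :: rest, c => if idx = c + 1 then some label else soloScan rest c

def next_solo_label_py (current_level : String) (target_level : String) : String :=
  let current_idx := SOLO_ORDER.getD current_level 0
  let target_idx := SOLO_ORDER.getD target_level current_idx
  if current_idx ≥ target_idx then
    (if target_level ≠ "" then target_level
     else if current_level ≠ "" then current_level else "Relational")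
  else
    match soloScan SOLO_ORDER.items current_idx with
    | some label => label
    | none =>
      (if target_level ≠ "" then target_level
       else if current_level ≠ "" then current_level else "Relational")

-- ===== PORT B =====
def SUCC : PySem.Dict String String := PySem.Dict.ofList
  [("Pre-structural", "Uni-structural"), ("Uni-structural", "Multi-structural"),
   ("Multi-structural", "Relational"), ("Relational", "Extended abstract")]

-- 'while probe is not None: if probe == target_level: return step; probe = _SUCC.get(probe)'
-- (fuel only makes the walk total; 5 ≥ the successor-chain length from any start)
def succFound : Nat → Option String → String → Bool
  | 0, _, _ => false
  | _ + 1, none, _ => false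
  | f + 1, some p, t => if p = t then true else succFound f (SUCC.get? p) t

def next_solo_label_py_alt (current_level : String) (target_level : String) : String :=
  let cur := if SUCC.contains current_level || current_level = "Extended abstract"
             then current_level else "Pre-structural"
  let step := SUCC.get? cur
  if succFound 5 step target_level then step.getD ""
  else
    (if target_level ≠ "" then target_level
     else if current_level ≠ "" then current_level else "Relational")

-- ===== PRECONDITION & SPEC =====
def Spec_next_solo_label_py (current_level : String) (target_level : String) (out : String) : Prop := out = next_solo_label_py_alt current_level target_level
instance (current_level : String) (target_level : String) (out : String) : Decidable (Spec_next_solo_label_py current_level target_level out) := by unfold Spec_next_solo_label_py; infer_instance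

-- ===== CLAIM (what is proved, stated in full; the proofs are below) =====
def Claim_equal_next_solo_label_py : Prop := ∀ (current_level : String) (target_level : String), Dom_next_solo_label_py current_level target_level → Spec_next_solo_label_py current_level target_level (next_solo_label_py current_level target_level)

-- ===== LEMMAS AND PROOFS =====

-- A's two index computations, expressed as one if-chain on the label
def soloRank (s : String) (d : Int) : Int :=
  if s = "Pre-structural" then 0
  else if s = "Uni-structural" then 1
  else if s = "Multi-structural" then 2
  else if s = "Relational" then 3
  else if s = "Extended abstract" then 4
  else d

theorem getD_SOLO (s : String) (d : Int) : SOLO_ORDER.getD s d = soloRank s d := by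
  unfold soloRank
  split_ifs with h1 h2 h3 h4 h5
  · subst h1; rfl
  · subst h2; rfl
  · subst h3; rfl
  · subst h4; rfl
  · subst h5; rfl
  · rw [PySem.Dict.getD_of_not_contains]
    have e : SOLO_ORDER = PySem.Dict.mk [("Pre-structural", 0), ("Uni-structural", 1),
      ("Multi-structural", 2), ("Relational", 3), ("Extended abstract", 4)] := rfl
    simp [e]
    exact ⟨fun h => h1 h.symm, fun h => h2 h.symm, fun h => h3 h.symm,
           fun h => h4 h.symm, fun h => h5 h.symm⟩

theorem contains_SUCC (s : String) : SUCC.contains s =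
    (s == "Pre-structural" || s == "Uni-structural" || s == "Multi-structural" || s == "Relational") := by
  have e : SUCC = PySem.Dict.mk [("Pre-structural", "Uni-structural"),
    ("Uni-structural", "Multi-structural"), ("Multi-structural", "Relational"),
    ("Relational", "Extended abstract")] := rfl
  simp only [e, PySem.Dict.contains, PySem.Dict.items]
  simp [BEq.comm, Bool.or_assoc]

theorem items_SOLO : SOLO_ORDER.items = [("Pre-structural", (0:Int)), ("Uni-structural", 1),
    ("Multi-structural", 2), ("Relational", 3), ("Extended abstract", 4)] := rfl

theorem get_SUCC_pre : SUCC.get? "Pre-structural" = some "Uni-structural" := rfl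
theorem get_SUCC_uni : SUCC.get? "Uni-structural" = some "Multi-structural" := rfl
theorem get_SUCC_mul : SUCC.get? "Multi-structural" = some "Relational" := rfl
theorem get_SUCC_rel : SUCC.get? "Relational" = some "Extended abstract" := rfl
theorem get_SUCC_ext : SUCC.get? "Extended abstract" = none := rfl

-- ===== VERDICT (by name: the statement is the Claim_ definition above) =====
theorem next_solo_label_py_spec : Claim_equal_next_solo_label_py := by
  intro cur tgt _
  unfold Spec_next_solo_label_py next_solo_label_py next_solo_label_py_alt
  by_cases h1 : cur = "Pre-structural" <;>
  by_cases h2 : cur = "Uni-structural" <;>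
  by_cases h3 : cur = "Multi-structural" <;>
  by_cases h4 : cur = "Relational" <;>
  by_cases h5 : cur = "Extended abstract" <;>
  by_cases t1 : tgt = "Pre-structural" <;>
  by_cases t2 : tgt = "Uni-structural" <;>
  by_cases t3 : tgt = "Multi-structural" <;>
  by_cases t4 : tgt = "Relational" <;>
  by_cases t5 : tgt = "Extended abstract" <;>
    first
    | (subst_vars; decide)
    | (subst_vars;
       simp [getD_SOLO, soloRank, soloScan, succFound, items_SOLO, contains_SUCC,
             get_SUCC_pre, get_SUCC_uni, get_SUCC_mul, get_SUCC_rel, get_SUCC_ext,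
             h1, h2, h3, h4, h5];
       done)
    | (subst_vars;
       simp [getD_SOLO, soloRank, soloScan, succFound, items_SOLO, contains_SUCC,
             get_SUCC_pre, get_SUCC_uni, get_SUCC_mul, get_SUCC_rel, get_SUCC_ext,
             t1, t2, t3, t4, t5, Ne.symm t1, Ne.symm t2, Ne.symm t3, Ne.symm t4, Ne.symm t5];
       done)
    | (subst_vars;
       simp [getD_SOLO, soloRank, soloScan, succFound, items_SOLO, contains_SUCC,
             get_SUCC_pre, get_SUCC_uni, get_SUCC_mul, get_SUCC_rel, get_SUCC_ext,
             h1, h2, h3, h4, h5,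
             t1, t2, t3, t4, t5, Ne.symm t1, Ne.symm t2, Ne.symm t3, Ne.symm t4, Ne.symm t5];
       done)
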